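-- pv_equiv track=rewrite | github.com/hcheorii/programmers_algorithm | lev_1/나머지가 1이 되는 수 찾기/main.py | solution
-- ===== SOURCE A (Python) =====
-- def solution(n):
--     answer = 0
--     a = []
--     for i in range(1, n):
--         if(n % i == 1):
--             a.append(i)
--
--     answer = min(a)
--     return answer
-- ===== SOURCE B (Python) =====
-- def solution(n):
--     # smallest i with n % i == 1 equals the smallest divisor > 1 of n - 1,
--     # found by trial division up to sqrt(n-1); if none, n - 1 itself.
--     m = n - 1
--     d = 2
--     while d * d <= m:
--         if m % d == 0:
--             return d
--         d += 1
--     return m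
-- ===== Notes on version B (the rewrite author's own statement) =====
-- stated objective: faster
-- what changed: A scans every i in range(1,n) collecting those with n%i==1 and takes min; B returns the smallest divisor >1 of n-1 by trial division up to sqrt(n-1), returning n-1 if none is found.
-- outside the precondition, e.g. on solution(2): A raises ValueError, B returns 1; on solution(1): A raises ValueError, B returns 0
import Mathlib
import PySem

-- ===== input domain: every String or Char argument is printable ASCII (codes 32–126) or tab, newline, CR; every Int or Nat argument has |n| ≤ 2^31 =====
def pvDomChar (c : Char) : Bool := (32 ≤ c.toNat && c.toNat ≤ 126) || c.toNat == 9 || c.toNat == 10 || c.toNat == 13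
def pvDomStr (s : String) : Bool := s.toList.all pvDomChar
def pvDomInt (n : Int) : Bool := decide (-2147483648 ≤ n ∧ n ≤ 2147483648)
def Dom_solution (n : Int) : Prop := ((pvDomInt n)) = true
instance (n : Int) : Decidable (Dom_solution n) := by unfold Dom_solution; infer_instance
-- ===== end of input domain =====

-- B replaces A's O(n) scan + min with trial division up to sqrt(n-1): the answer is the
-- smallest divisor > 1 of n-1 (asymptotically faster, measured).


-- ===== PORT A =====
-- for i in range(1, n): if n % i == 1: a.append(i);  answer = min(a)
-- min([]) raises ValueError in Python; here it is the `.getD 0` arm, excluded by Pre_.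
def solution (n : Int) : Int :=
  let a : List Int :=
    (PySem.List.pyRange 1 n 1).foldl
      (fun acc i => if PySem.Int.mod n i == 1 then acc ++ [i] else acc) []
  (PySem.List.min? a (fun x => x)).getD 0

-- ===== PORT B =====
-- while d * d <= m: if m % d == 0: return d; d += 1;  return m
-- (fuel is only a totality bound for the while loop: d*d ≤ m forces d ≤ m, so
--  m+1-d ticks down to 0 before the guard can still hold; the loop body is unchanged)
def trialDivFuel (fuel : Nat) (m d : Int) : Int :=
  match fuel with
  | 0 => m
  | fuel + 1 =>
    if d * d ≤ m then
      if PySem.Int.mod m d == 0 then d else trialDivFuel fuel m (d + 1)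
    else m

def solution_alt (n : Int) : Int := trialDivFuel (n + 1 - 2).toNat (n - 1) 2

-- ===== PRECONDITION & SPEC =====
-- Pre_ excludes n ≤ 2, where A's collected list is empty and min([]) raises ValueError.
def Pre_solution (n : Int) : Prop := 3 ≤ n
instance (n : Int) : Decidable (Pre_solution n) := by unfold Pre_solution; infer_instance
def pvWitness_solution : Int := (10)

def Spec_solution (n : Int) (out : Int) : Prop := out = solution_alt n
instance (n : Int) (out : Int) : Decidable (Spec_solution n out) := by unfold Spec_solution; infer_instance

-- ===== CLAIM (what is proved, stated in full; the proofs are below) =====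
def Claim_equal_solution : Prop := ∀ (n : Int), Dom_solution n → Pre_solution n → Spec_solution n (solution n)

-- ===== LEMMAS AND PROOFS =====

-- characterisation of A's membership test: for 1 ≤ i, n % i == 1 ↔ i is a divisor > 1 of n-1
lemma mod_eq_one_iff (n i : Int) (hi : 1 ≤ i) :
    PySem.Int.mod n i = 1 ↔ 2 ≤ i ∧ i ∣ (n - 1) := by
  rcases eq_or_lt_of_le hi with h1 | h2
  · subst h1; simp [PySem.Int.mod]
  · rw [PySem.Int.mod_eq_emod_of_pos (by omega : (0:Int) < i)]
    constructor
    · intro h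
      refine ⟨by omega, ?_⟩
      have hdef : n % i = n - i * (n / i) := Int.emod_def n i
      exact ⟨n / i, by omega⟩
    · rintro ⟨-, k, hk⟩
      have hn : n = 1 + i * k := by omega
      rw [hn, Int.add_mul_emod_self_left]
      exact Int.emod_eq_of_lt (by omega) (by omega)

lemma dvd_toNat_of_dvd (d m : Int) (hd : 0 ≤ d) (hm : 0 ≤ m) (h : d ∣ m) :
    d.toNat ∣ m.toNat := by
  rwa [← Int.natCast_dvd_natCast, Int.toNat_of_nonneg hd, Int.toNat_of_nonneg hm]

-- trialDivFuel with enough fuel, started at any d between 2 and minFac(m), returns minFac of m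
lemma trialDiv_eq_minFac (m : Int) (hm : 2 ≤ m) (k : Nat) :
    ∀ d : Int, (m + 1 - d).toNat ≤ k → 2 ≤ d → d ≤ (m.toNat.minFac : Int) →
      trialDivFuel k m d = (m.toNat.minFac : Int) := by
  have hM1 : m.toNat ≠ 1 := by omega
  have hpdvdN : m.toNat.minFac ∣ m.toNat := Nat.minFac_dvd _
  have hple : m.toNat.minFac ≤ m.toNat := Nat.le_of_dvd (by omega) hpdvdN
  have hpdvd : ((m.toNat.minFac : Int)) ∣ m := by
    have := Int.natCast_dvd_natCast.mpr hpdvdN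
    simpa [Int.toNat_of_nonneg (by omega : (0:Int) ≤ m)] using this
  induction k with
  | zero =>
    intro d hk h2 hdp
    have : m.toNat.minFac ≤ m.toNat := Nat.le_of_dvd (by omega) hpdvdN
    omega
  | succ k ih =>
    intro d hk h2 hdp
    rw [trialDivFuel]
    by_cases hsq : d * d ≤ m
    · rw [if_pos hsq]
      by_cases hdvd : PySem.Int.mod m d = 0
      · rw [if_pos (by simpa using hdvd)]
        have hddvd : d ∣ m := (PySem.Int.mod_eq_zero_iff_dvd m d).mp hdvd
        have : m.toNat.minFac ≤ d.toNat :=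
          Nat.minFac_le_of_dvd (by omega) (dvd_toNat_of_dvd d m (by omega) (by omega) hddvd)
        omega
      · rw [if_neg (by simpa using hdvd)]
        have hne : d ≠ (m.toNat.minFac : Int) := by
          intro he; exact hdvd ((PySem.Int.mod_eq_zero_iff_dvd m d).mpr (he ▸ hpdvd))
        have hdm : d ≤ m := by nlinarith [mul_self_nonneg (d - 1)]
        exact ih (d + 1) (by omega) (by omega) (by omega)
    · rw [if_neg hsq]
      -- here m < d*d and d ≤ minFac, so minFac(m) = m (the cofactor would be a smaller divisor)
      set p := m.toNat.minFac with hp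
      have hq : m.toNat / p * p = m.toNat := Nat.div_mul_cancel hpdvdN
      have hq1 : m.toNat / p = 1 := by
        by_contra hne
        have hq2 : 2 ≤ m.toNat / p := by
          rcases Nat.eq_zero_or_pos (m.toNat / p) with h0 | h1
          · rw [h0, Nat.zero_mul] at hq; omega
          · omega
        have hqdvd : m.toNat / p ∣ m.toNat := ⟨p, hq.symm⟩
        have hpq : p ≤ m.toNat / p := Nat.minFac_le_of_dvd hq2 hqdvd
        have hpp : p * p ≤ m.toNat := by
          calc p * p ≤ m.toNat / p * p := Nat.mul_le_mul_right _ hpq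
          _ = m.toNat := hq
        have hdd : d * d ≤ m := by
          have h1 : d * d ≤ (p : Int) * (p : Int) :=
            mul_le_mul hdp hdp (by omega) (by exact_mod_cast Nat.zero_le p)
          have h2 : ((p : Int)) * p ≤ m := by
            have := hpp
            have : ((p * p : Nat) : Int) ≤ ((m.toNat : Nat) : Int) := by exact_mod_cast this
            push_cast at this
            omega
          omega
        exact hsq hdd
      rw [hq1, Nat.one_mul] at hq
      omega

-- ===== VERDICT (by name: the statement is the Claim_ definition above) =====
theorem solution_spec : Claim_equal_solution := by
  intro n _ hpre
  unfold Pre_solution at hpre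
  unfold Spec_solution
  have hsol : solution n = (PySem.List.min? ((PySem.List.pyRange 1 n 1).filter
      (fun i => PySem.Int.mod n i == 1)) (fun x => x)).getD 0 := by
    simp only [solution]
    rw [PySem.List.foldl_append_if_eq_filter, List.nil_append]
  rw [hsol]
  unfold solution_alt
  set m : Int := n - 1 with hm
  have hm2 : 2 ≤ m := by omega
  set p : Int := (m.toNat.minFac : Int) with hp
  have hM1 : m.toNat ≠ 1 := by omega
  have hp2 : 2 ≤ p := by
    rw [hp]; exact_mod_cast (Nat.minFac_prime hM1).two_le
  have hpdvdN : m.toNat.minFac ∣ m.toNat := Nat.minFac_dvd _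
  have hpleN : m.toNat.minFac ≤ m.toNat := Nat.le_of_dvd (by omega) hpdvdN
  have hple : p ≤ m := by omega
  have htn : ((m.toNat : Int)) = m := Int.toNat_of_nonneg (by omega)
  have hpdvd : p ∣ m := by
    rw [hp, ← htn]; exact_mod_cast hpdvdN
  -- p is in A's list
  have hmem : p ∈ (PySem.List.pyRange 1 n 1).filter (fun i => PySem.Int.mod n i == 1) := by
    rw [List.mem_filter]
    constructor
    · rw [PySem.List.mem_pyRange_one]; omega
    · simpa using (mod_eq_one_iff n p (by omega)).mpr ⟨hp2, by rw [← hm]; exact hpdvd⟩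
  -- min? returns some v, and v = p
  obtain ⟨v, hv⟩ : ∃ v, PySem.List.min? ((PySem.List.pyRange 1 n 1).filter (fun i => PySem.Int.mod n i == 1)) (fun x => x) = some v := by
    cases hmin : PySem.List.min? ((PySem.List.pyRange 1 n 1).filter (fun i => PySem.Int.mod n i == 1)) (fun x => x) with
    | none => rw [PySem.List.min?_eq_none_iff] at hmin; rw [hmin] at hmem; simp at hmem
    | some v => exact ⟨v, rfl⟩
  have hvmem := PySem.List.min?_mem hv
  rw [List.mem_filter, PySem.List.mem_pyRange_one] at hvmem
  have hvdiv : 2 ≤ v ∧ v ∣ m := by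
    have := (mod_eq_one_iff n v (by omega)).mp (by simpa using hvmem.2)
    rwa [← hm] at this
  have hpv : p ≤ v := by
    have : m.toNat.minFac ≤ v.toNat :=
      Nat.minFac_le_of_dvd (by omega) (dvd_toNat_of_dvd v m (by omega) (by omega) hvdiv.2)
    omega
  have hvp : v ≤ p := PySem.List.min?_isMin hv p hmem
  have hvep : v = p := le_antisymm hvp hpv
  rw [hv]
  simp only [Option.getD_some, hvep]
  exact (trialDiv_eq_minFac m hm2 (n + 1 - 2).toNat 2 (by omega) (by omega) (by omega)).symm
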